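-- pv_equiv track=rewrite | github.com/lsm2002/password-checker | main.py | keyboardcheck
-- ===== SOURCE A (Python) =====
-- topkeyboard = "QWERTYUIOP"
--
-- middlekeyboard = "ASDFGHJKL"
--
-- bottomkeyboard = "ZXCVBNM"
--
-- def keyboardcheck(password):
--     deductions = 0
--     for i in range(0,len(password)-2):
--         for j in range(0,len(topkeyboard)-2):
--             if(password[i]+password[i+1]+password[i+2]).upper()==(topkeyboard[j]+topkeyboard[j+1]+topkeyboard[j+2]):
--                 deductions += 5
--         for j in range(0,len(middlekeyboard)-2):
--             if(password[i]+password[i+1]+password[i+2]).upper()==(middlekeyboard[j]+middlekeyboard[j+1]+middlekeyboard[j+2]):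
--                 deductions += 5
--         for j in range(0,len(bottomkeyboard)-2):
--             if(password[i]+password[i+1]+password[i+2]).upper()==(bottomkeyboard[j]+bottomkeyboard[j+1]+bottomkeyboard[j+2]):
--                 deductions += 5
--     return deductions
-- ===== SOURCE B (Python) =====
-- topkeyboard = "QWERTYUIOP"
--
-- middlekeyboard = "ASDFGHJKL"
--
-- bottomkeyboard = "ZXCVBNM"
--
-- def keyboardcheck(password):
--     trigrams = set()
--     for row in (topkeyboard, middlekeyboard, bottomkeyboard):
--         for k in range(len(row) - 2):
--             trigrams.add(row[k:k + 3])
--     deductions = 0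
--     for i in range(len(password) - 2):
--         if password[i:i + 3].upper() in trigrams:
--             deductions += 5
--     return deductions
-- ===== Notes on version B (the rewrite author's own statement) =====
-- stated objective: simpler
-- what changed: B precomputes the set of all 20 keyboard trigrams once and replaces A's three nested per-position scans of the row strings by a single slice-and-membership test per password position (valid because the 20 trigrams are pairwise distinct, so each position scores 5 at most once in A too).
import Mathlib
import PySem

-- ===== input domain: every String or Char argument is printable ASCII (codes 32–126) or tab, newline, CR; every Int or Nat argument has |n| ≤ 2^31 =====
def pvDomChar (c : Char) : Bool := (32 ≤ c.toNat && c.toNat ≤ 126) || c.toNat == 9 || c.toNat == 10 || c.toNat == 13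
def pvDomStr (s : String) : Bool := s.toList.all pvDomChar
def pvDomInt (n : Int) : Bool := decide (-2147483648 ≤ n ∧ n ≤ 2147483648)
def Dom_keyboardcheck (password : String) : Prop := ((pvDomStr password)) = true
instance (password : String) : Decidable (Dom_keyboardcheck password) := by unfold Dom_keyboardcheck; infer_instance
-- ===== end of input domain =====

-- B replaces A's three nested per-position scans of the keyboard rows by one membership
-- test against a prebuilt set of all 20 keyboard trigrams (objective: simpler/faster constant).

-- ===== PORT A =====
-- module constants, as code-point lists (Python strings compared char-exactly)
def kbTop : List Char := "QWERTYUIOP".toList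
def kbMiddle : List Char := "ASDFGHJKL".toList
def kbBottom : List Char := "ZXCVBNM".toList

-- A's inner loop over one keyboard row: Python builds row[j]+row[j+1]+row[j+2] and compares
-- strings; on List Char that concatenation of 1-char strings is exactly the 3-element list.
-- (indices j, j+1, j+2 are always in range, so pyGetD's default is never used)
def kbRowScan (u : List Char) (row : List Char) (d : Int) : Int :=
  (PySem.List.pyRange 0 ((row.length : Int) - 2) 1).foldl (fun acc j =>
    if u = [PySem.List.pyGetD row j ' ', PySem.List.pyGetD row (j + 1) ' ',
            PySem.List.pyGetD row (j + 2) ' '] then acc + 5 else acc) d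

def keyboardcheck (password : String) : Int :=
  let p := password.toList
  (PySem.List.pyRange 0 ((p.length : Int) - 2) 1).foldl (fun d i =>
    let u := PySem.Chars.upper
      [PySem.List.pyGetD p i ' ', PySem.List.pyGetD p (i + 1) ' ',
       PySem.List.pyGetD p (i + 2) ' ']
    kbRowScan u kbBottom (kbRowScan u kbMiddle (kbRowScan u kbTop d))) 0

-- ===== PORT B =====
-- the prebuilt set of all 20 keyboard trigrams (trigrams = set(); … trigrams.add(row[k:k+3]))
def kbTrigramSet : PySem.Set (List Char) :=
  [kbTop, kbMiddle, kbBottom].foldl (fun s row =>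
    (PySem.List.pyRange 0 ((row.length : Int) - 2) 1).foldl (fun s k =>
      PySem.Set.add s (PySem.List.slice row (some k) (some (k + 3)))) s) PySem.Set.empty

def keyboardcheck_alt (password : String) : Int :=
  let p := password.toList
  (PySem.List.pyRange 0 ((p.length : Int) - 2) 1).foldl (fun d i =>
    if PySem.Set.contains kbTrigramSet
        (PySem.Chars.upper (PySem.List.slice p (some i) (some (i + 3)))) then d + 5 else d) 0

-- ===== PRECONDITION & SPEC =====
def Spec_keyboardcheck (password : String) (out : Int) : Prop := out = keyboardcheck_alt password
instance (password : String) (out : Int) : Decidable (Spec_keyboardcheck password out) := by unfold Spec_keyboardcheck; infer_instance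

-- ===== CLAIM (what is proved, stated in full; the proofs are below) =====
def Claim_equal_keyboardcheck : Prop := ∀ (password : String), Dom_keyboardcheck password → Spec_keyboardcheck password (keyboardcheck password)

-- ===== LEMMAS AND PROOFS =====

-- the 20 keyboard trigrams, written out
def kbAllTris : List (List Char) :=
  [['Q','W','E'],['W','E','R'],['E','R','T'],['R','T','Y'],['T','Y','U'],
   ['Y','U','I'],['U','I','O'],['I','O','P'],
   ['A','S','D'],['S','D','F'],['D','F','G'],['F','G','H'],['G','H','J'],
   ['H','J','K'],['J','K','L'],
   ['Z','X','C'],['X','C','V'],['C','V','B'],['V','B','N'],['B','N','M']]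

-- A's three concrete row scans, chained, are one fold over the 20 literal trigrams
lemma kb_scans_eq (u : List Char) (d : Int) :
    kbRowScan u kbBottom (kbRowScan u kbMiddle (kbRowScan u kbTop d))
      = kbAllTris.foldl (fun acc t => if u = t then acc + 5 else acc) d := rfl

-- B's prebuilt set is that same list (all 20 trigrams are distinct)
lemma kb_set_eq : kbTrigramSet = kbAllTris := by decide

-- summing 5 per match over a duplicate-free list is a single membership test
lemma foldl_five_nodup {α : Type} [DecidableEq α] (u : α) (ts : List α) (d : Int)
    (h : ts.Nodup) :
    ts.foldl (fun acc t => if u = t then acc + 5 else acc) d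
      = if u ∈ ts then d + 5 else d := by
  induction ts generalizing d with
  | nil => simp
  | cons t ts ih =>
    rcases List.nodup_cons.mp h with ⟨hnt, hts⟩
    by_cases hu : u = t
    · subst hu
      simp only [List.foldl_cons, ih _ hts, List.mem_cons, true_or, if_pos]
      simp [hnt]
    · simp [List.foldl_cons, hu, ih _ hts]

-- per-position equality of the two loop bodies
lemma kb_body_eq (u : List Char) (d : Int) :
    kbRowScan u kbBottom (kbRowScan u kbMiddle (kbRowScan u kbTop d))
      = if PySem.Set.contains kbTrigramSet u then d + 5 else d := by
  rw [kb_scans_eq, foldl_five_nodup u kbAllTris d (by decide), kb_set_eq]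
  by_cases h : u ∈ kbAllTris <;>
    simp [h, PySem.Set.contains]

-- ===== VERDICT (by name: the statement is the Claim_ definition above) =====
theorem keyboardcheck_spec : Claim_equal_keyboardcheck := by
  intro password _
  unfold Spec_keyboardcheck keyboardcheck keyboardcheck_alt
  apply PySem.List.foldl_congr_mem'
  intro i hi d
  rcases (PySem.List.mem_pyRange_one).mp hi with ⟨h0, h2⟩
  obtain ⟨k, rfl⟩ : ∃ k : Nat, i = (k : Int) := ⟨i.toNat, (Int.toNat_of_nonneg h0).symm⟩
  have hk : k + 2 < password.toList.length := by
    have := h2; omega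
  have hslice : PySem.List.slice password.toList (some (k : Int)) (some ((k : Int) + 3))
      = [password.toList[k], password.toList[k+1], password.toList[k+2]] := by
    have h3 : ((k : Int) + 3) = ((k + 3 : Nat) : Int) := by push_cast; ring
    rw [h3, PySem.List.slice_natCast]
    have e1 := List.drop_eq_getElem_cons (l := password.toList) (by omega : k < password.toList.length)
    have e2 := List.drop_eq_getElem_cons (l := password.toList) (by omega : k + 1 < password.toList.length)
    have e3 := List.drop_eq_getElem_cons (l := password.toList) (by omega : k + 2 < password.toList.length)
    have hsub : k + 3 - k = 3 := by omega
    rw [hsub, e1, e2, e3]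
    rfl
  have hget : ∀ (m : Nat) (hm : m < password.toList.length),
      PySem.List.pyGetD password.toList ((m : Int)) ' ' = password.toList[m]'hm := by
    intro m hm
    simp [PySem.List.pyGetD_natCast, List.getElem?_eq_getElem hm]
  have c1 : (k : Int) + 1 = ((k + 1 : Nat) : Int) := by push_cast; ring
  have c2 : (k : Int) + 2 = ((k + 2 : Nat) : Int) := by push_cast; ring
  rw [hslice, c1, c2, hget k (by omega), hget (k+1) (by omega), hget (k+2) (by omega)]
  exact kb_body_eq _ d
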